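-- pv_equiv track=rewrite | github.com/sidou06/hackerrank-solutions | Algorithms/Greedy/Goodland Electricity/Solution.py | pylons
-- ===== SOURCE A (Python) =====
-- def pylons(k, arr):
--     # Write your code here
--     i = 0
--     tot = 0
--     while i < len(arr):
--         j = min(i + k - 1, len(arr) - 1)
--         stop = max(0,i - k + 1)
--         while j >= stop:
--             if arr[j] == 1:
--                 i = j + k
--                 tot += 1
--                 break
--             else:
--                 j -= 1
--         if j < stop:
--             return(-1)
--     return tot
-- ===== SOURCE B (Python) =====
-- def pylons(k, arr):
--     n = len(arr)
--     # nearest index of a 1 at or to the left of each position (-1 if none)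
--     prev = [-1] * n
--     last = -1
--     for idx, v in enumerate(arr):
--         if v == 1:
--             last = idx
--         prev[idx] = last
--     pos = 0
--     count = 0
--     while pos < n:
--         hi = min(pos + k - 1, n - 1)
--         if hi < 0:
--             return -1
--         p = prev[hi]
--         if p < max(0, pos - k + 1):
--             return -1
--         count += 1
--         pos = p + k
--     return count
-- ===== Notes on version B (the rewrite author's own statement) =====
-- stated objective: alternative
-- what changed: B precomputes a nearest-1-to-the-left index array in one forward pass and then jumps greedily with one array lookup per placed plant, replacing A's backwards inner scan of the window for each plant.
import Mathlib
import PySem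

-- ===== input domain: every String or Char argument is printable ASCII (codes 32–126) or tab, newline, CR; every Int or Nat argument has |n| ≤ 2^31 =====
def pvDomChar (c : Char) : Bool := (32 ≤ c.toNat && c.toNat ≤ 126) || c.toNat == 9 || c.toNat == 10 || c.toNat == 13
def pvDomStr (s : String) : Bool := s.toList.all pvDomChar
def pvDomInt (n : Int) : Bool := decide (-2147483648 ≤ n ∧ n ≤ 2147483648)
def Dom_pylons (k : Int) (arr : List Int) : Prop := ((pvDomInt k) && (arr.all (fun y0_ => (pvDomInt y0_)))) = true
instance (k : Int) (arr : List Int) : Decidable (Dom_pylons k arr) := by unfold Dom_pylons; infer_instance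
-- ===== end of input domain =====

-- B replaces A's backwards inner scan per placed plant by a precomputed
-- nearest-'1'-to-the-left index array consulted once per step (alternative
-- algorithm); return values are proved identical.

-- ===== PORT A =====
-- A's inner 'while j >= stop' scan: returns the j it breaks at (some j) or none when j < stop.
def pylonsInner (arr : List Int) (stop j : Int) : Option Int :=
  if h : stop ≤ j then
    if PySem.List.pyGet? arr j = some 1 then some j
    else pylonsInner arr stop (j - 1)
  else none
termination_by (j + 1 - stop).toNat
decreasing_by omega

-- used by pylonsLoop's decreasing_by (the found index is ≥ stop, so i strictly increases)
theorem pylonsInner_ge (arr : List Int) (stop j m : Int)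
    (h : pylonsInner arr stop j = some m) : stop ≤ m := by
  fun_induction pylonsInner arr stop j with
  | case1 j hle hget => simp at h; omega
  | case2 j hle hget ih => exact ih h
  | case3 j hle => simp at h

-- A's outer 'while i < len(arr)' loop.
def pylonsLoop (k : Int) (arr : List Int) (i tot : Int) : Int :=
  if _hc : i < (arr.length : Int) then
    match hm : pylonsInner arr (max 0 (i - k + 1)) (min (i + k - 1) ((arr.length : Int) - 1)) with
    | some m => pylonsLoop k arr (m + k) (tot + 1)
    | none => -1
  else tot
termination_by ((arr.length : Int) - i).toNat
decreasing_by
  have h2 := pylonsInner_ge arr _ _ _ hm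
  have h3 : i - k + 1 ≤ m := le_trans (le_max_right _ _) h2
  omega

def pylons (k : Int) (arr : List Int) : Int := pylonsLoop k arr 0 0

-- ===== PORT B =====
-- prev[idx] = index of the nearest 1 at or to the left of idx (-1 if none); B's enumerate loop.
def buildPrevGo (arr : List Int) (last idx : Int) : List Int :=
  match arr with
  | [] => []
  | v :: rest =>
    let last' := if v = 1 then idx else last
    last' :: buildPrevGo rest last' (idx + 1)

-- B's 'while pos < n' loop: one prev lookup per step.  (prev[hi] is always in range;
-- the getD default is never used.)
def pylonsAltLoop (k n : Int) (prev : List Int) (pos count : Int) : Int :=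
  if hc : pos < n then
    if min (pos + k - 1) (n - 1) < 0 then -1
    else
      if hp : (PySem.List.pyGet? prev (min (pos + k - 1) (n - 1))).getD (-1) < max 0 (pos - k + 1)
      then -1
      else pylonsAltLoop k n prev ((PySem.List.pyGet? prev (min (pos + k - 1) (n - 1))).getD (-1) + k) (count + 1)
  else count
termination_by (n - pos).toNat
decreasing_by
  have h3 : pos - k + 1 ≤ max 0 (pos - k + 1) := le_max_right _ _
  omega

def pylons_alt (k : Int) (arr : List Int) : Int :=
  pylonsAltLoop k (arr.length : Int) (buildPrevGo arr (-1) 0) 0 0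

-- ===== PRECONDITION & SPEC =====
def Spec_pylons (k : Int) (arr : List Int) (out : Int) : Prop := out = pylons_alt k arr
instance (k : Int) (arr : List Int) (out : Int) : Decidable (Spec_pylons k arr out) := by unfold Spec_pylons; infer_instance

-- ===== CLAIM (what is proved, stated in full; the proofs are below) =====
def Claim_equal_pylons : Prop := ∀ (k : Int) (arr : List Int), Dom_pylons k arr → Spec_pylons k arr (pylons k arr)

-- ===== LEMMAS AND PROOFS =====

-- spec function: nearest index m ≤ j with arr[m] = 1, else -1
def prevUpTo (arr : List Int) (j : Int) : Int :=
  if h : 0 ≤ j then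
    if PySem.List.pyGet? arr j = some 1 then j else prevUpTo arr (j - 1)
  else -1
termination_by (j + 1).toNat
decreasing_by omega

theorem prevUpTo_le (arr : List Int) (j : Int) :
    prevUpTo arr j ≤ j ∨ prevUpTo arr j = -1 := by
  fun_induction prevUpTo arr j with
  | case1 j h hget => left; omega
  | case2 j h hget ih => rcases ih with h' | h' <;> [left; right] <;> omega
  | case3 j h => right; rfl

-- A's inner scan characterized by prevUpTo
theorem pylonsInner_eq (arr : List Int) (stop j : Int) (hstop : 0 ≤ stop) :
    pylonsInner arr stop j =
      if stop ≤ prevUpTo arr j then some (prevUpTo arr j) else none := by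
  fun_induction pylonsInner arr stop j with
  | case1 j hle hget =>
    rw [prevUpTo]
    simp only [show (0:Int) ≤ j by omega, dite_true, hget, if_true]
    rw [if_pos hle]
  | case2 j hle hget ih =>
    rw [prevUpTo]
    simp only [show (0:Int) ≤ j by omega, dite_true, hget, if_false]
    exact ih
  | case3 j hle =>
    rcases prevUpTo_le arr j with h' | h' <;> rw [if_neg (by omega)]

-- B's prev array entries equal prevUpTo
theorem buildPrevGo_get (arr : List Int) :
    ∀ (h s : Nat), s + h < arr.length →
      (buildPrevGo (arr.drop s) (prevUpTo arr ((s : Int) - 1)) (s : Int))[h]? =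
        some (prevUpTo arr ((s : Int) + h)) := by
  intro h
  induction h with
  | zero =>
    intro s hs
    have hdrop : arr.drop s = arr[s] :: arr.drop (s + 1) := List.drop_eq_getElem_cons (by omega)
    have hget : PySem.List.pyGet? arr (s:Int) = some arr[s] :=
      PySem.List.pyGet?_ofNat (xs := arr) (n := s) (by omega)
    rw [hdrop]
    show ((if arr[s] = 1 then (s:Int) else prevUpTo arr ((s:Int) - 1)) ::
      buildPrevGo (arr.drop (s+1)) _ ((s:Int) + 1))[0]? = _
    rw [List.getElem?_cons_zero, Nat.cast_zero, add_zero]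
    conv_rhs => rw [prevUpTo]
    rw [dif_pos (Int.natCast_nonneg s), hget]
    by_cases hv : arr[s] = 1
    · simp [hv]
    · simp [hv]
  | succ h ih =>
    intro s hs
    have hdrop : arr.drop s = arr[s] :: arr.drop (s + 1) := List.drop_eq_getElem_cons (by omega)
    have ih' := ih (s + 1) (by omega)
    have hget : PySem.List.pyGet? arr (s:Int) = some arr[s] :=
      PySem.List.pyGet?_ofNat (xs := arr) (n := s) (by omega)
    have hlast : (if arr[s] = 1 then (s:Int) else prevUpTo arr ((s:Int) - 1)) = prevUpTo arr (s:Int) := by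
      conv_rhs => rw [prevUpTo]
      rw [dif_pos (Int.natCast_nonneg s), hget]
      by_cases hv : arr[s] = 1
      · simp [hv]
      · simp [hv]
    rw [hdrop]
    show ((if arr[s] = 1 then (s:Int) else prevUpTo arr ((s:Int) - 1)) ::
      buildPrevGo (arr.drop (s+1)) _ ((s:Int) + 1))[h+1]? = _
    rw [List.getElem?_cons_succ, hlast]
    have e2 : ((s+1 : Nat) : Int) - 1 = (s : Int) := by push_cast; ring
    have e1 : ((s+1 : Nat) : Int) = (s : Int) + 1 := by push_cast; ring
    rw [e2, e1] at ih'
    have e3 : (s : Int) + ((h+1 : Nat) : Int) = (s : Int) + 1 + (h : Int) := by push_cast; ring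
    rw [e3]
    exact ih'

theorem prev_lookup (arr : List Int) (hi : Int) (h0 : 0 ≤ hi) (h1 : hi < (arr.length : Int)) :
    (PySem.List.pyGet? (buildPrevGo arr (-1) 0) hi).getD (-1) = prevUpTo arr hi := by
  have hnat : hi = ((hi.toNat : Nat) : Int) := by omega
  have hlt : 0 + hi.toNat < arr.length := by omega
  have hb := buildPrevGo_get arr hi.toNat 0 hlt
  simp only [List.drop_zero, Nat.cast_zero, zero_add] at hb
  have : prevUpTo arr ((0:Int) - 1) = -1 := by rw [prevUpTo]; norm_num
  rw [this] at hb
  rw [hnat, PySem.List.pyGet?_natCast, hb]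
  simp

theorem loops_eq (k : Int) (arr : List Int) :
    ∀ (N : Nat) (i tot : Int), ((arr.length : Int) - i).toNat ≤ N →
      pylonsLoop k arr i tot = pylonsAltLoop k (arr.length : Int) (buildPrevGo arr (-1) 0) i tot := by
  intro N
  induction N with
  | zero =>
    intro i tot hN
    rw [pylonsLoop, pylonsAltLoop]
    rw [dif_neg (by omega), dif_neg (by omega)]
  | succ N ih =>
    intro i tot hN
    rw [pylonsLoop, pylonsAltLoop]
    by_cases hc : i < (arr.length : Int)
    · rw [dif_pos hc, dif_pos hc]
      set j := min (i + k - 1) ((arr.length : Int) - 1) with hj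
      set stop := max 0 (i - k + 1) with hstop
      have hstop0 : 0 ≤ stop := le_max_left _ _
      by_cases hneg : j < 0
      · -- empty window: A's inner scan fails immediately, B returns -1 on hi < 0
        rw [if_pos hneg]
        have : pylonsInner arr stop j = none := by rw [pylonsInner]; rw [dif_neg (by omega)]
        rw [this]
      · rw [if_neg hneg]
        have hjlt : j < (arr.length : Int) := by
          have := min_le_right (i + k - 1) ((arr.length : Int) - 1); omega
        have hp := prev_lookup arr j (by omega) hjlt
        rw [pylonsInner_eq arr stop j hstop0, hp]
        by_cases hlt : prevUpTo arr j < stop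
        · rw [if_neg (by omega), dif_pos hlt]
        · rw [if_pos (by omega), dif_neg hlt]
          show pylonsLoop k arr (prevUpTo arr j + k) (tot + 1) = _
          have hge : stop ≤ prevUpTo arr j := by omega
          have hb : i - k + 1 ≤ prevUpTo arr j := le_trans (le_max_right _ _) hge
          exact ih _ _ (by omega)
    · rw [dif_neg hc, dif_neg hc]

-- ===== VERDICT (by name: the statement is the Claim_ definition above) =====
theorem pylons_spec : Claim_equal_pylons := by
  intro k arr _
  unfold Spec_pylons pylons pylons_alt
  exact loops_eq k arr _ 0 0 le_rfl
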